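-- pv_equiv track=rewrite | github.com/zorvan/coordination-engine | telegram-bot/bot/common/attendance.py | parse_attendance
-- ===== SOURCE A (Python) =====
-- from typing import Any
--
-- ATTENDEE_STATUSES = ("invited", "interested", "confirmed")
--
-- PRE_LOCK_CONFIRMED_STATUSES = {"confirmed"}
--
-- def _normalize_attendee_status(raw_status: str | None) -> str | None:
--     """Normalize and validate attendee status tokens."""
--     if raw_status is None:
--         return "interested"
--     status = str(raw_status).strip().lower()
--     # Map legacy 'committed' to 'confirmed'
--     if status == "committed":
--         status = "confirmed"
--     if status in ATTENDEE_STATUSES: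
--         return status
--     return None
--
-- def _parse_attendance_item(item: Any) -> tuple[int | None, str | None]:
--     """Parse attendance item into (telegram_user_id, status)."""
--     token = str(item).strip()
--     if not token:
--         return None, None
--
--     if ":" not in token:
--         if token.isdigit():
--             return int(token), "interested"
--         return None, None
--
--     uid_raw, raw_status = token.split(":", 1)
--     if not uid_raw.isdigit():
--         return None, None
--     status = _normalize_attendee_status(raw_status)
--     if status is None:
--         return None, None
--     return int(uid_raw), status
--
-- def _attendance_to_status_map(attendance_list: list[Any] | None) -> dict[int, str]:
--     """Parse attendance markers into a deduplicated status map by user ID."""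
--     status_by_user: dict[int, str] = {}
--     for item in attendance_list or []:
--         telegram_user_id, status = _parse_attendance_item(item)
--         if telegram_user_id is None or status is None:
--             continue
--         status_by_user[telegram_user_id] = status
--     return status_by_user
--
-- def parse_attendance(attendance_list: list[Any] | None) -> tuple[set[int], set[int]]:
--     """Return participant ids and confirmed participant ids."""
--     status_by_user = _attendance_to_status_map(attendance_list)
--     participants = set(status_by_user.keys())
--     confirmed = {
--         telegram_user_id
--         for telegram_user_id, status in status_by_user.items()
--         if status in PRE_LOCK_CONFIRMED_STATUSES
--     }
--     return participants, confirmed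
-- ===== SOURCE B (Python) =====
-- ATTENDEE_STATUSES = ("invited", "interested", "confirmed")
--
--
-- def _normalize_attendee_status(raw_status):
--     if raw_status is None:
--         return "interested"
--     status = str(raw_status).strip().lower()
--     if status == "committed":
--         status = "confirmed"
--     if status in ATTENDEE_STATUSES:
--         return status
--     return None
--
--
-- def _parse_attendance_item(item):
--     token = str(item).strip()
--     if not token:
--         return None, None
--     if ":" not in token:
--         if token.isdigit():
--             return int(token), "interested"
--         return None, None
--     uid_raw, raw_status = token.split(":", 1)
--     if not uid_raw.isdigit():
--         return None, None
--     status = _normalize_attendee_status(raw_status)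
--     if status is None:
--         return None, None
--     return int(uid_raw), status
--
--
-- def parse_attendance(attendance_list):
--     # Single pass, no status map: keep two sets and let a later non-confirmed
--     # status knock the user back out of `confirmed` (last write wins).
--     participants = set()
--     confirmed = set()
--     for item in attendance_list or []:
--         uid, status = _parse_attendance_item(item)
--         if uid is None or status is None:
--             continue
--         participants.add(uid)
--         if status == "confirmed":
--             confirmed.add(uid)
--         else:
--             confirmed.discard(uid)
--     return participants, participants & confirmed
-- ===== Notes on version B (the rewrite author's own statement) =====
-- stated objective: alternative
-- what changed: Replaces the intermediate user->status dict plus the two derived passes (set of keys, comprehension over items) by a single loop that maintains the participants and confirmed sets directly, with confirmed.discard on a non-confirmed status reproducing last-write-wins.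
import Mathlib
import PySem

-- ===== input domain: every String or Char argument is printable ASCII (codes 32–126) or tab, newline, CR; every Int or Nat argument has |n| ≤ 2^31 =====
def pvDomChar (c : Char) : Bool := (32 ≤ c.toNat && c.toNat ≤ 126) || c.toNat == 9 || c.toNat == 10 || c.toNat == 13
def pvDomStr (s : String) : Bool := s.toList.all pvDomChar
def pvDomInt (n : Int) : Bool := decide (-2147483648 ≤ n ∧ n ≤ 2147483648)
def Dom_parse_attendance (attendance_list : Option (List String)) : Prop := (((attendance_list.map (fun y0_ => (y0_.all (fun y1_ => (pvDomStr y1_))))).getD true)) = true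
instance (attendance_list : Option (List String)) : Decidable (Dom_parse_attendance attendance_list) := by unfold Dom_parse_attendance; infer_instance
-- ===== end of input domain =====

-- B replaces A's user→status dict and its two derived passes by one loop that
-- maintains the participants and confirmed sets directly (alternative decomposition).

-- ===== PORT A =====
-- shared parsing helpers (A's `_normalize_attendee_status` / `_parse_attendance_item`;
-- B's Python reuses the identical helpers)
def pvAttendeeStatuses : List String := ["invited", "interested", "confirmed"]

def pvPreLockConfirmed : PySem.Set String := ["confirmed"]

def pvNormalizeStatus (raw_status : Option String) : Option String :=
  match raw_status with
  | none => some "interested"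
  | some r =>
    let status := PySem.Str.lower (PySem.Str.strip r)
    let status := if status == "committed" then "confirmed" else status
    if pvAttendeeStatuses.contains status then some status else none

def pvParseItem (item : String) : Option Int × Option String :=
  let token := PySem.Str.strip item
  if token == "" then (none, none)
  else if !(PySem.Str.isIn ":" token) then
    if PySem.Str.strIsdigit token then
      -- `.getD 0` is exact: token.isdigit() guarantees int(token) parses
      (some ((PySem.Int.ofStr? token).getD 0), some "interested")
    else (none, none)
  else
    match (PySem.Str.splitMax? token ":" 1).getD [] with
    | [uid_raw, raw_status] =>
      if PySem.Str.strIsdigit uid_raw then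
        match pvNormalizeStatus (some raw_status) with
        | some status => (some ((PySem.Int.ofStr? uid_raw).getD 0), some status)
        | none => (none, none)
      else (none, none)
    | _ => (none, none)  -- unreachable: ":" in token gives exactly two pieces

def parse_attendance (attendance_list : Option (List String)) : List Int × List Int :=
  let status_by_user : PySem.Dict Int String :=
    (attendance_list.getD []).foldl (fun d item =>
      match pvParseItem item with
      | (some uid, some status) => d.insert uid status
      | _ => d) PySem.Dict.empty
  let participants : PySem.Set Int := PySem.Set.ofList status_by_user.keys
  let confirmed : PySem.Set Int :=
    PySem.Set.ofList ((status_by_user.items.filter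
      (fun p => PySem.Set.contains pvPreLockConfirmed p.2)).map (fun p => p.1))
  (participants, confirmed)

-- ===== PORT B =====
def parse_attendance_alt (attendance_list : Option (List String)) : List Int × List Int :=
  let st : PySem.Set Int × PySem.Set Int :=
    (attendance_list.getD []).foldl (fun st item =>
      let pr := pvParseItem item
      match pr.1 with
      | none => st
      | some uid =>
        match pr.2 with
        | none => st
        | some status =>
          (PySem.Set.add st.1 uid,
           if status == "confirmed" then PySem.Set.add st.2 uid
           else PySem.Set.discard st.2 uid)) ([], [])
  (st.1, PySem.Set.inter st.1 st.2)

-- ===== PRECONDITION & SPEC =====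
def Spec_parse_attendance (attendance_list : Option (List String)) (out : List Int × List Int) : Prop := out = parse_attendance_alt attendance_list
instance (attendance_list : Option (List String)) (out : List Int × List Int) : Decidable (Spec_parse_attendance attendance_list out) := by unfold Spec_parse_attendance; infer_instance

-- ===== CLAIM (what is proved, stated in full; the proofs are below) =====
def Claim_equal_parse_attendance : Prop := ∀ (attendance_list : Option (List String)), Dom_parse_attendance attendance_list → Spec_parse_attendance attendance_list (parse_attendance attendance_list)

-- ===== LEMMAS AND PROOFS =====

-- The coupled invariant of the two loops: B's first set is the dict's key list,
-- and membership in B's second set says exactly "this user's current status is confirmed".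
theorem pv_loop_invariant (xs : List String) :
    ∀ (d : PySem.Dict Int String) (P C : PySem.Set Int),
      P = d.keys → d.keys.Nodup →
      (∀ u : Int, u ∈ C ↔ d.getD u "" = "confirmed") →
      (let d' := xs.foldl (fun d item =>
          match pvParseItem item with
          | (some uid, some status) => d.insert uid status
          | _ => d) d
       let st' := xs.foldl (fun st item =>
          let pr := pvParseItem item
          match pr.1 with
          | none => st
          | some uid =>
            match pr.2 with
            | none => st
            | some status =>
              (PySem.Set.add st.1 uid,
               if status == "confirmed" then PySem.Set.add st.2 uid
               else PySem.Set.discard st.2 uid)) (P, C)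
       st'.1 = d'.keys ∧ d'.keys.Nodup ∧
         ∀ u : Int, u ∈ st'.2 ↔ d'.getD u "" = "confirmed") := by
  induction xs with
  | nil => intro d P C hP hnd hC; exact ⟨hP, hnd, hC⟩
  | cons x xs ih =>
    intro d P C hP hnd hC
    simp only [List.foldl_cons]
    rcases hpx : pvParseItem x with ⟨ou, os⟩
    rcases ou with _ | uid
    · rcases os with _ | status <;> exact ih d P C hP hnd hC
    · rcases os with _ | status
      · exact ih d P C hP hnd hC
      · refine ih (d.insert uid status) _ _ ?_ ?_ ?_
        · -- keys after insert = Set.add of the keys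
          by_cases hc : d.contains uid = true
          · rw [PySem.Dict.keys_insert_of_contains d status hc, hP,
                PySem.Set.add_of_mem ((PySem.Dict.contains_iff_mem_keys d uid).mp hc)]
          · rw [PySem.Dict.keys_insert_of_not_contains d status
                  (by simpa using hc), hP,
                PySem.Set.add_of_not_mem
                  (fun hmem => hc ((PySem.Dict.contains_iff_mem_keys d uid).mpr hmem))]
        · exact PySem.Dict.nodup_keys_insert d uid status hnd
        · intro u
          rw [PySem.Dict.getD_insert]
          by_cases hu : u = uid
          · subst hu
            by_cases hs : status = "confirmed" <;>
              simp [hs, PySem.Set.mem_add, PySem.Set.mem_discard]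
          · by_cases hs : status = "confirmed" <;>
              simp [hs, PySem.Set.mem_add, PySem.Set.mem_discard, hu, hC u]

-- membership in the one-element status set is equality with "confirmed"
theorem pv_prelock_contains (s : String) :
    PySem.Set.contains pvPreLockConfirmed s = (s == "confirmed") := by
  by_cases h : s = "confirmed" <;>
    simp [pvPreLockConfirmed, PySem.Set.contains, h]

theorem parse_attendance_eq (attendance_list : Option (List String)) :
    parse_attendance attendance_list = parse_attendance_alt attendance_list := by
  obtain ⟨hP, hnd, hC⟩ := pv_loop_invariant (attendance_list.getD []) PySem.Dict.empty [] []
    (by simp [PySem.Dict.keys_empty])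
    (by simp [PySem.Dict.keys_empty])
    (by intro u; simp [PySem.Dict.getD_empty])
  set d := (attendance_list.getD []).foldl (fun d item =>
      match pvParseItem item with
      | (some uid, some status) => d.insert uid status
      | _ => d) PySem.Dict.empty with hd
  set st := (attendance_list.getD []).foldl (fun st item =>
      let pr := pvParseItem item
      match pr.1 with
      | none => st
      | some uid =>
        match pr.2 with
        | none => st
        | some status =>
          (PySem.Set.add st.1 uid,
           if status == "confirmed" then PySem.Set.add st.2 uid
           else PySem.Set.discard st.2 uid)) (([], []) : PySem.Set Int × PySem.Set Int) with hst
  show (PySem.Set.ofList d.keys,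
        PySem.Set.ofList ((d.items.filter
          (fun p => PySem.Set.contains pvPreLockConfirmed p.2)).map (fun p => p.1)))
      = (st.1, PySem.Set.inter st.1 st.2)
  refine Prod.ext ?_ ?_
  · -- participants: the dict's key list is exactly B's first set
    simpa using (PySem.Set.ofList_eq_self_of_nodup _ hnd).trans hP.symm
  · -- confirmed: filter the keys by "current status is confirmed"
    show PySem.Set.ofList ((d.items.filter
        (fun p => PySem.Set.contains pvPreLockConfirmed p.2)).map (fun p => p.1))
      = PySem.Set.inter st.1 st.2
    rw [PySem.Dict.items_eq_map_keys d hnd "", List.filter_map, List.map_map]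
    have hmap : ((fun p : Int × String => p.1) ∘ fun k : Int => (k, d.getD k "")) = id := rfl
    rw [hmap, List.map_id]
    have hpred : ((fun p : Int × String => PySem.Set.contains pvPreLockConfirmed p.2) ∘
        fun k : Int => (k, d.getD k "")) = fun k => d.getD k "" == "confirmed" := by
      funext k; exact pv_prelock_contains _
    rw [hpred]
    rw [PySem.Set.ofList_eq_self_of_nodup _ (hnd.filter _)]
    have hinter : PySem.Set.inter st.1 st.2
        = st.1.filter (fun x => PySem.Set.contains st.2 x) := rfl
    rw [hinter, ← hP]
    refine List.filter_congr ?_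
    intro u _
    by_cases hm : u ∈ st.2
    · have h2 : d.getD u "" = "confirmed" := (hC u).mp hm
      simp [h2, hm]
    · have h2 : d.getD u "" ≠ "confirmed" := fun h => hm ((hC u).mpr h)
      simp [h2, hm]

-- ===== VERDICT (by name: the statement is the Claim_ definition above) =====
theorem parse_attendance_spec : Claim_equal_parse_attendance := by
  intro al _
  unfold Spec_parse_attendance
  exact parse_attendance_eq al
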